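-- pv_equiv track=rewrite | github.com/mauriciocucco/gaia | src/hf_gaia_agent/evidence_solver.py | _award_candidate_context
-- ===== SOURCE A (Python) =====
-- def _award_candidate_context(text: str, start: int, end: int) -> str:
--     left = max(
--         text.rfind(".", 0, start),
--         text.rfind("!", 0, start),
--         text.rfind("?", 0, start),
--         text.rfind("\n", 0, start),
--     )
--     right_candidates = [idx for idx in (
--         text.find(".", end),
--         text.find("!", end),
--         text.find("?", end),
--         text.find("\n", end),
--     ) if idx != -1]
--     right = min(right_candidates) if right_candidates else len(text)
--     return text[left + 1 : right].strip()
-- ===== SOURCE B (Python) =====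
-- BOUNDARY = {'.', '!', '?', '\n'}
--
--
-- def _award_candidate_context(text: str, start: int, end: int) -> str:
--     n = len(text)
--     s = start + n if start < 0 else start
--     s = max(0, min(s, n))
--     e = end + n if end < 0 else end
--     e = max(0, min(e, n))
--     left = -1
--     for i in range(s - 1, -1, -1):
--         if text[i] in BOUNDARY:
--             left = i
--             break
--     right = n
--     for j in range(e, n):
--         if text[j] in BOUNDARY:
--             right = j
--             break
--     return text[left + 1:right].strip()
-- ===== Notes on version B (the rewrite author's own statement) =====
-- stated objective: alternative
-- what changed: Replaces the eight substring searches (four rfind over text[0:start] plus four find from end, then max/filter/min) by clamping start/end once and doing one backward scan for the nearest boundary character before start and one forward scan for the nearest boundary at or after end.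
import Mathlib
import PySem

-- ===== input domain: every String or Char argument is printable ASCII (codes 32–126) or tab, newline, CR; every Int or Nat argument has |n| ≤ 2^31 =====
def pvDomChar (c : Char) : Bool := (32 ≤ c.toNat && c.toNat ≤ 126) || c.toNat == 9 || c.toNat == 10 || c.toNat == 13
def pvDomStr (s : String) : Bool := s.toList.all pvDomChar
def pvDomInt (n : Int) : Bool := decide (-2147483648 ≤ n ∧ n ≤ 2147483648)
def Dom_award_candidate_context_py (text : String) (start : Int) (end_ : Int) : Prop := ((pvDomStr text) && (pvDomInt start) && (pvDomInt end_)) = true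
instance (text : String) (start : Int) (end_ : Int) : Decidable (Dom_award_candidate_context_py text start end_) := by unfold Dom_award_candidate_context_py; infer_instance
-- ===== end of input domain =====

-- B replaces A's eight substring searches (4×rfind, 4×find, max/filter/min) by one clamp of
-- start/end and two direct boundary-character scans; same value, no speed claim (objective: alternative).

-- ===== PORT A =====
def award_candidate_context_py (text : String) (start : Int) (end_ : Int) : String :=
  let left := max (max (max
      (PySem.Str.rfindFrom text "." 0 (some start))
      (PySem.Str.rfindFrom text "!" 0 (some start)))
      (PySem.Str.rfindFrom text "?" 0 (some start)))
      (PySem.Str.rfindFrom text "\n" 0 (some start))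
  let rightCandidates :=
    [PySem.Str.findFrom text "." end_ none,
     PySem.Str.findFrom text "!" end_ none,
     PySem.Str.findFrom text "?" end_ none,
     PySem.Str.findFrom text "\n" end_ none].filter (fun idx => idx ≠ -1)
  let right := if rightCandidates.isEmpty then PySem.Str.len text
               else (PySem.List.min? rightCandidates (fun x => x)).getD 0
  PySem.Str.strip (PySem.Str.slice text (some (left + 1)) (some right))

-- ===== PORT B =====
def pvBoundary (c : Char) : Bool := c == '.' || c == '!' || c == '?' || c == '\n'

-- backward scan: for i in range(s-1, -1, -1): if text[i] in BOUNDARY: left = i; break (else -1)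
def pvScanL (cs : List Char) : Nat → Int
  | 0 => -1
  | i + 1 => if pvBoundary (PySem.List.pyGetD cs (i : Int) ' ') then (i : Int) else pvScanL cs i

-- forward scan over the suffix text[e:]: index of the first boundary char, else n
def pvScanR : List Char → Int → Int
  | [], off => off
  | c :: rest, off => if pvBoundary c then off else pvScanR rest (off + 1)

def award_candidate_context_py_alt (text : String) (start : Int) (end_ : Int) : String :=
  let cs := text.toList
  let n : Int := cs.length
  let s := max 0 (min (if start < 0 then start + n else start) n)
  let e := max 0 (min (if end_ < 0 then end_ + n else end_) n)
  let left := pvScanL cs s.toNat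
  let right := pvScanR (cs.drop e.toNat) e
  PySem.Str.strip (PySem.Str.slice text (some (left + 1)) (some right))

-- ===== PRECONDITION & SPEC =====
def Spec_award_candidate_context_py (text : String) (start : Int) (end_ : Int) (out : String) : Prop := out = award_candidate_context_py_alt text start end_
instance (text : String) (start : Int) (end_ : Int) (out : String) : Decidable (Spec_award_candidate_context_py text start end_ out) := by unfold Spec_award_candidate_context_py; infer_instance

-- ===== CLAIM (what is proved, stated in full; the proofs are below) =====
def Claim_equal_award_candidate_context_py : Prop := ∀ (text : String) (start : Int) (end_ : Int), Dom_award_candidate_context_py text start end_ → Spec_award_candidate_context_py text start end_ (award_candidate_context_py text start end_)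

-- ===== LEMMAS AND PROOFS =====

def pvSl1 (cs : List Char) (c : Char) : Nat → Int
  | 0 => -1
  | i + 1 => if cs[i]? = some c then (i : Int) else pvSl1 cs c i

theorem pvSl1_lt (cs : List Char) (c : Char) (k : Nat) : pvSl1 cs c k < k := by
  induction k with
  | zero => simp [pvSl1]
  | succ i ih => simp only [pvSl1]; split <;> omega

theorem single_isPrefixOf (c : Char) (ds : List Char) :
    ([c].isPrefixOf ds = true) ↔ ds[0]? = some c := by
  cases ds <;> simp [List.isPrefixOf]
  exact ⟨Eq.symm, Eq.symm⟩

theorem rfind_go_eq_pvSl1 (cs : List Char) (c : Char) (j : Nat) :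
    PySem.Chars.rfind.go cs [c] j = pvSl1 cs c (j + 1) := by
  induction j with
  | zero =>
    show (if [c].isPrefixOf cs then (0:Int) else -1) = _
    simp only [pvSl1]
    by_cases h : cs[0]? = some c
    · rw [if_pos ((single_isPrefixOf c cs).2 h), if_pos h]; simp
    · rw [if_neg (fun hp => h ((single_isPrefixOf c cs).1 hp)), if_neg h]
  | succ j ih =>
    show (if [c].isPrefixOf (cs.drop (j+1)) then ((j:Int)+1) else PySem.Chars.rfind.go cs [c] j) = _
    rw [ih]
    simp only [pvSl1]
    have hd : (cs.drop (j+1))[0]? = cs[j+1]? := by simp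
    by_cases h : cs[j+1]? = some c
    · rw [if_pos ((single_isPrefixOf c _).2 (hd.trans h)), if_pos h]; push_cast; ring
    · rw [if_neg (fun hp => h (hd.symm.trans ((single_isPrefixOf c _).1 hp))), if_neg h]

theorem pvSl1_take (cs : List Char) (c : Char) (k m : Nat) (hm : m ≤ k) :
    pvSl1 (cs.take k) c m = pvSl1 cs c m := by
  induction m with
  | zero => rfl
  | succ i ih =>
    simp only [pvSl1]
    rw [List.getElem?_take_of_lt (by omega), ih (by omega)]

theorem rfind_take_eq_pvSl1 (cs : List Char) (c : Char) (k : Nat) (hk : k ≤ cs.length) :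
    PySem.Chars.rfind (cs.take k) [c] = pvSl1 cs c k := by
  show PySem.Chars.rfind.go (cs.take k) [c] (cs.take k).length = _
  rw [List.length_take, Nat.min_eq_left hk, rfind_go_eq_pvSl1]
  simp only [pvSl1]
  rw [if_neg (by simp), pvSl1_take cs c k k le_rfl]

def pvFs1 (c : Char) : List Char → Int
  | [] => -1
  | d :: rest => if d = c then 0 else (if pvFs1 c rest = -1 then -1 else 1 + pvFs1 c rest)

theorem pvFs1_cases (c : Char) (ds : List Char) : pvFs1 c ds = -1 ∨ 0 ≤ pvFs1 c ds := by
  induction ds with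
  | nil => simp [pvFs1]
  | cons d rest ih =>
    simp only [pvFs1]
    split_ifs <;> omega

theorem find_go_eq_pvFs1 (c : Char) (ds : List Char) (k : Nat) :
    PySem.Chars.find.go [c] ds k = if pvFs1 c ds = -1 then -1 else k + pvFs1 c ds := by
  induction ds generalizing k with
  | nil => simp [PySem.Chars.find.go, pvFs1]
  | cons d rest ih =>
    show (if [c].isPrefixOf (d :: rest) then (k:Int) else PySem.Chars.find.go [c] rest (k+1)) = _
    rw [ih]
    simp only [pvFs1]
    by_cases h : d = c
    · rw [if_pos (by simp [List.isPrefixOf, h]), if_pos h]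
      simp
    · rw [if_neg (by simp [List.isPrefixOf]; exact fun hc => h hc.symm), if_neg h]
      rcases pvFs1_cases c rest with h2 | h2
      · simp [h2]
      · have h3 : ¬ pvFs1 c rest = -1 := by omega
        simp only [if_neg h3]
        rw [if_neg (by omega)]
        push_cast; ring

theorem find_eq_pvFs1 (ds : List Char) (c : Char) :
    PySem.Chars.find ds [c] = pvFs1 c ds := by
  show PySem.Chars.find.go [c] ds 0 = _
  rw [find_go_eq_pvFs1]
  by_cases h : pvFs1 c ds = -1 <;> simp [h]
theorem pvMax4_eq_scanL (cs : List Char) (k : Nat) :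
    max (max (max (pvSl1 cs '.' k) (pvSl1 cs '!' k)) (pvSl1 cs '?' k)) (pvSl1 cs '\n' k)
      = pvScanL cs k := by
  induction k with
  | zero => simp [pvSl1, pvScanL]
  | succ i ih =>
    have b1 := pvSl1_lt cs '.' i
    have b2 := pvSl1_lt cs '!' i
    have b3 := pvSl1_lt cs '?' i
    have b4 := pvSl1_lt cs '\n' i
    simp only [pvSl1, pvScanL, PySem.List.pyGetD_natCast, List.getD_eq_getElem?_getD]
    cases hg : cs[i]? with
    | none =>
      simp only [Option.getD_none]
      rw [if_neg (by simp), if_neg (by simp), if_neg (by simp), if_neg (by simp),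
          if_neg (by decide)]
      exact ih
    | some c =>
      simp only [Option.getD_some, Option.some.injEq]
      by_cases hb : pvBoundary c = true
      · rw [if_pos hb]
        rcases (show c = '.' ∨ c = '!' ∨ c = '?' ∨ c = '\n' by
            revert hb; simp [pvBoundary]; tauto) with hc | hc | hc | hc <;>
          subst hc <;> simp [max_def] <;> omega
      · rw [if_neg hb]
        have hnb : ∀ x : Char, pvBoundary x = true → ¬ (c = x) := by
          intro x hx he; exact hb (he ▸ hx)
        rw [if_neg (hnb '.' (by decide)), if_neg (hnb '!' (by decide)),
            if_neg (hnb '?' (by decide)), if_neg (hnb '\n' (by decide))]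
        exact ih

def pvCnd (off v : Int) : Int := if v = -1 then -1 else off + v

theorem pvMinval (l : List Int) (a : Int) (hmem : a ∈ l) (hle : ∀ y ∈ l, a ≤ y) :
    (PySem.List.min? l (fun x => x)).getD 0 = a := by
  rcases hm : PySem.List.min? l (fun x => x) with _ | m
  · rw [PySem.List.min?_eq_none_iff] at hm; simp [hm] at hmem
  · have h1 : a ≤ m := hle m (PySem.List.min?_mem hm)
    have h2 : m ≤ a := PySem.List.min?_id_le hm a hmem
    simp [le_antisymm h2 h1]

theorem pvMin_eq_scanR (ds : List Char) (off : Int) (hoff : 0 ≤ off) :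
    (let cands := [pvCnd off (pvFs1 '.' ds), pvCnd off (pvFs1 '!' ds),
                   pvCnd off (pvFs1 '?' ds), pvCnd off (pvFs1 '\n' ds)].filter (fun idx => idx ≠ -1);
     if cands.isEmpty then off + ds.length
     else (PySem.List.min? cands (fun x => x)).getD 0) = pvScanR ds off := by
  induction ds generalizing off with
  | nil => simp [pvFs1, pvCnd, pvScanR]
  | cons d rest ih =>
    simp only [pvScanR]
    have hshift : ∀ c : Char, ¬ d = c →
        pvCnd off (pvFs1 c (d :: rest)) = pvCnd (off + 1) (pvFs1 c rest) := by
      intro c hne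
      simp only [pvFs1, if_neg hne, pvCnd]
      rcases pvFs1_cases c rest with h | h
      · simp [h]
      · have h1 : ¬ pvFs1 c rest = -1 := by omega
        simp only [if_neg h1]
        rw [if_neg (by omega)]
        ring
    by_cases hb : pvBoundary d = true
    · rw [if_pos hb]
      have hself : ∀ c : Char, d = c → pvCnd off (pvFs1 c (d :: rest)) = off := by
        intro c he
        simp [pvFs1, he, pvCnd]
      have hge : ∀ c : Char, pvCnd off (pvFs1 c (d :: rest)) = -1 ∨
          off ≤ pvCnd off (pvFs1 c (d :: rest)) := by
        intro c
        by_cases he : d = c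
        · right; rw [hself c he]
        · rw [hshift c he]
          rcases pvFs1_cases c rest with h | h
          · left; simp [pvCnd, h]
          · right; simp only [pvCnd]; rw [if_neg (by omega)]; omega
      rcases (show d = '.' ∨ d = '!' ∨ d = '?' ∨ d = '\n' by
          revert hb; simp [pvBoundary]; tauto) with hc | hc | hc | hc
      all_goals {
        have hoffmem : off ∈ ([pvCnd off (pvFs1 '.' (d :: rest)), pvCnd off (pvFs1 '!' (d :: rest)),
            pvCnd off (pvFs1 '?' (d :: rest)), pvCnd off (pvFs1 '\n' (d :: rest))].filter
              (fun idx => idx ≠ -1)) := by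
          rw [List.mem_filter]
          refine ⟨?_, by simp; omega⟩
          have := hself _ hc
          simp only [List.mem_cons]
          tauto
        have hne' : (([pvCnd off (pvFs1 '.' (d :: rest)), pvCnd off (pvFs1 '!' (d :: rest)),
            pvCnd off (pvFs1 '?' (d :: rest)), pvCnd off (pvFs1 '\n' (d :: rest))].filter
              (fun idx => idx ≠ -1)).isEmpty) ≠ true := by
          simp only [ne_eq, List.isEmpty_iff]
          intro hemp
          rw [hemp] at hoffmem
          simp at hoffmem
        rw [if_neg hne']
        apply pvMinval _ _ hoffmem
        intro y hy
        rw [List.mem_filter] at hy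
        obtain ⟨hy1, hy2⟩ := hy
        simp only [List.mem_cons, List.not_mem_nil, or_false] at hy1
        have hall : ∀ c : Char, y = pvCnd off (pvFs1 c (d :: rest)) → off ≤ y := by
          intro c he
          rcases hge c with h | h
          · exfalso; rw [he, h] at hy2; simp at hy2
          · omega
        rcases hy1 with h | h | h | h
        · exact hall '.' h
        · exact hall '!' h
        · exact hall '?' h
        · exact hall '\n' h
      }
    · rw [if_neg hb]
      have hnb : ∀ c : Char, pvBoundary c = true → ¬ d = c := fun c hc he => hb (he ▸ hc)
      rw [hshift '.' (hnb '.' (by decide)), hshift '!' (hnb '!' (by decide)),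
          hshift '?' (hnb '?' (by decide)), hshift '\n' (hnb '\n' (by decide))]
      have harith : off + ((d :: rest).length : Int) = (off + 1) + rest.length := by
        push_cast [List.length_cons]; ring
      rw [harith]
      exact ih (off + 1) (by omega)

theorem rfindFrom_single (cs : List Char) (c : Char) (start : Int) :
    PySem.Chars.rfindFrom cs [c] 0 (some start)
      = pvSl1 cs c (max 0 (min (if start < 0 then start + cs.length else start) cs.length)).toNat := by
  unfold PySem.Chars.rfindFrom
  simp only [lt_irrefl, if_false, Int.toNat_zero, List.drop_zero, zero_add]
  set E : Int := max 0 (min (if start < 0 then start + cs.length else start) cs.length) with hE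
  have hE0 : 0 ≤ E := by omega
  have hEn : E ≤ cs.length := by omega
  have hee : (if (cs.length : Int) < start then (cs.length : Int)
      else if start < 0 then (if start + cs.length < 0 then 0 else start + cs.length) else start) = E := by
    rw [hE]; split_ifs <;> omega
  rw [hee]
  rw [if_neg (by omega)]
  rw [rfind_take_eq_pvSl1 cs c E.toNat (by omega)]
  split <;> omega

theorem findFrom_single (cs : List Char) (c : Char) (end_ : Int) (h : end_ ≤ (cs.length : Int)) :
    PySem.Chars.findFrom cs [c] end_ none
      = pvCnd (max 0 (min (if end_ < 0 then end_ + cs.length else end_) cs.length))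
          (pvFs1 c (cs.drop (max 0 (min (if end_ < 0 then end_ + cs.length else end_) cs.length)).toNat)) := by
  obtain ⟨E, hE⟩ : ∃ E : Int,
      max 0 (min (if end_ < 0 then end_ + (cs.length : Int) else end_) (cs.length : Int)) = E := ⟨_, rfl⟩
  rw [hE]
  have hE0 : 0 ≤ E := by rw [← hE]; exact le_max_left _ _
  have hEn : E ≤ (cs.length : Int) := by
    rw [← hE]; exact max_le (Int.natCast_nonneg _) (min_le_right _ _)
  have hst : (if end_ < 0 then (if end_ + (cs.length:Int) < 0 then (0:Int) else end_ + (cs.length:Int)) else end_) = E := by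
    rw [← hE]; split_ifs <;> omega
  unfold PySem.Chars.findFrom
  show (if (cs.length : Int) < (if end_ < 0 then (if end_ + (cs.length:Int) < 0 then (0:Int) else end_ + (cs.length:Int)) else end_)
      then (-1 : Int)
      else (if PySem.Chars.find (List.drop (Int.toNat (if end_ < 0 then (if end_ + (cs.length:Int) < 0 then (0:Int) else end_ + (cs.length:Int)) else end_)) (List.take (Int.toNat ((cs.length : Int))) cs)) [c] = -1 then (-1 : Int)
            else (if end_ < 0 then (if end_ + (cs.length:Int) < 0 then (0:Int) else end_ + (cs.length:Int)) else end_) + PySem.Chars.find (List.drop (Int.toNat (if end_ < 0 then (if end_ + (cs.length:Int) < 0 then (0:Int) else end_ + (cs.length:Int)) else end_)) (List.take (Int.toNat ((cs.length : Int))) cs)) [c]))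
    = pvCnd E (pvFs1 c (List.drop E.toNat cs))
  rw [hst]
  rw [if_neg (by omega)]
  rw [Int.toNat_natCast, List.take_length, find_eq_pvFs1]
  simp only [pvCnd]

theorem findFrom_single_big (cs : List Char) (c : Char) (end_ : Int) (h : (cs.length : Int) < end_) :
    PySem.Chars.findFrom cs [c] end_ none = -1 := by
  unfold PySem.Chars.findFrom
  show (if (cs.length : Int) < (if end_ < 0 then (if end_ + (cs.length:Int) < 0 then (0:Int) else end_ + (cs.length:Int)) else end_)
      then (-1 : Int)
      else (if PySem.Chars.find (List.drop (Int.toNat (if end_ < 0 then (if end_ + (cs.length:Int) < 0 then (0:Int) else end_ + (cs.length:Int)) else end_)) (List.take (Int.toNat ((cs.length : Int))) cs)) [c] = -1 then (-1 : Int)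
            else (if end_ < 0 then (if end_ + (cs.length:Int) < 0 then (0:Int) else end_ + (cs.length:Int)) else end_) + PySem.Chars.find (List.drop (Int.toNat (if end_ < 0 then (if end_ + (cs.length:Int) < 0 then (0:Int) else end_ + (cs.length:Int)) else end_)) (List.take (Int.toNat ((cs.length : Int))) cs)) [c]))
    = -1
  rw [if_pos (by split_ifs <;> omega)]

theorem main_eq (text : String) (start end_ : Int) :
    award_candidate_context_py text start end_ = award_candidate_context_py_alt text start end_ := by
  unfold award_candidate_context_py award_candidate_context_py_alt
  simp only [PySem.Str.rfindFrom_eq, PySem.Str.findFrom_eq]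
  rw [show (".":String).toList = ['.'] from rfl, show ("!":String).toList = ['!'] from rfl,
      show ("?":String).toList = ['?'] from rfl, show ("\n":String).toList = ['\n'] from rfl]
  rw [rfindFrom_single text.toList '.' start, rfindFrom_single text.toList '!' start,
      rfindFrom_single text.toList '?' start, rfindFrom_single text.toList '\n' start,
      pvMax4_eq_scanL]
  obtain ⟨E, hE⟩ : ∃ E : Int,
      max 0 (min (if end_ < 0 then end_ + (text.toList.length : Int) else end_) (text.toList.length : Int)) = E := ⟨_, rfl⟩
  have hE0 : 0 ≤ E := by rw [← hE]; exact le_max_left _ _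
  have hEn : E ≤ (text.toList.length : Int) := by
    rw [← hE]; exact max_le (Int.natCast_nonneg _) (min_le_right _ _)
  rcases le_or_gt end_ (text.toList.length : Int) with hend | hend
  · rw [findFrom_single text.toList '.' end_ hend, findFrom_single text.toList '!' end_ hend,
        findFrom_single text.toList '?' end_ hend, findFrom_single text.toList '\n' end_ hend]
    rw [hE]
    have hlen : PySem.Str.len text = E + ((text.toList.drop E.toNat).length : Int) := by
      rw [PySem.Str.len_eq]
      simp only [List.length_drop, String.length_toList] at hE0 hEn ⊢
      omega
    rw [hlen]
    rw [pvMin_eq_scanR (text.toList.drop E.toNat) E hE0]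
  · rw [findFrom_single_big text.toList '.' end_ hend, findFrom_single_big text.toList '!' end_ hend,
        findFrom_single_big text.toList '?' end_ hend, findFrom_single_big text.toList '\n' end_ hend]
    have hEeq : E = (text.toList.length : Int) := by rw [← hE]; split_ifs <;> omega
    rw [hE, hEeq]
    simp only [List.filter]
    norm_num
    rw [show List.drop text.length text.toList = ([] : List Char) from by simp]
    simp [pvScanR]

-- ===== VERDICT (by name: the statement is the Claim_ definition above) =====
theorem award_candidate_context_py_spec : Claim_equal_award_candidate_context_py := by
  intro text start end_ _
  unfold Spec_award_candidate_context_py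
  exact main_eq text start end_
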